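-- pv_equiv track=rewrite | github.com/stefandanielachirei/licenta-2025-ciprian-olaru | moves/cube_solve/rotations.py | rotate_face_str
-- ===== SOURCE A (Python) =====
-- def rotate_face_str(face, deg):
--     if deg == 0:
--         return face
--     elif deg == 90:
--         mapping = [2, 0, 3, 1]    # 90°
--     elif deg == 180:
--         mapping = [3, 2, 1, 0]    # 180°
--     elif deg == 270:
--         mapping = [1, 3, 0, 2]    # 270°
--     else:
--         raise ValueError("Unsupported rotation degree.")
--     return "".join(face[i] for i in mapping)
-- ===== SOURCE B (Python) =====
-- def rotate_face_str(face, deg):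
--     if deg not in (0, 90, 180, 270):
--         raise ValueError("Unsupported rotation degree.")
--     result = face
--     for _ in range(deg // 90):
--         result = "".join(result[i] for i in (2, 0, 3, 1))
--     return result
-- ===== Notes on version B (the rewrite author's own statement) =====
-- stated objective: alternative
-- what changed: B validates the degree up front, then iterates the single 90-degree permutation step deg//90 times instead of selecting one of three hard-coded permutation tables.
import Mathlib
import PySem

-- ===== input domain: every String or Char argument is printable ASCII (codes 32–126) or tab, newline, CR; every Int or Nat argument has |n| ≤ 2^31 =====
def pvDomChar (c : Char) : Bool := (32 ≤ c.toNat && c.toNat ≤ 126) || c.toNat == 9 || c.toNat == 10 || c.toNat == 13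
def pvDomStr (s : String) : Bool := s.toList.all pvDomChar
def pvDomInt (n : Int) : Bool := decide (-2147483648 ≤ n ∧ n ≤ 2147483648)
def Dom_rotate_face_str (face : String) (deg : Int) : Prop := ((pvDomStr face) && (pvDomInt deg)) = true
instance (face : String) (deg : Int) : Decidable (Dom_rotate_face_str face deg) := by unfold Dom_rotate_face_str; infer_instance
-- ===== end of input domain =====

-- B validates the degree first and iterates a single 90° permutation step deg//90 times instead of A's three per-degree tables; alternative decomposition, no speed claim.
-- ===== PORT A =====
def rotate_face_str (face : String) (deg : Int) : String :=
  if deg == 0 then face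
  else
    let mapping : List Int :=
      if deg == 90 then [2, 0, 3, 1]
      else if deg == 180 then [3, 2, 1, 0]
      else if deg == 270 then [1, 3, 0, 2]
      else []  -- Python raises ValueError here; excluded by Pre_
    String.ofList (mapping.map (fun i => (PySem.Str.pyGet? face i).getD ' '))

-- ===== PORT B =====
def pvRotStep (s : String) : String :=
  String.ofList (([2, 0, 3, 1] : List Int).map (fun i => (PySem.Str.pyGet? s i).getD ' '))

def rotate_face_str_alt (face : String) (deg : Int) : String :=
  if !(deg == 0 || deg == 90 || deg == 180 || deg == 270) then ""  -- Python raises ValueError here; excluded by Pre_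
  else pvRotStep^[(PySem.Int.floordiv deg 90).toNat] face

-- ===== PRECONDITION & SPEC =====
-- Pre_ excludes exactly the inputs where Python A raises: degrees outside {0,90,180,270} (ValueError)
-- and faces shorter than 4 characters with a nonzero degree (IndexError); B raises the same exceptions there.
def Pre_rotate_face_str (face : String) (deg : Int) : Prop :=
  (deg = 0 ∨ deg = 90 ∨ deg = 180 ∨ deg = 270) ∧ (deg = 0 ∨ 4 ≤ face.toList.length)
instance (face : String) (deg : Int) : Decidable (Pre_rotate_face_str face deg) := by
  unfold Pre_rotate_face_str; infer_instance
def pvWitness_rotate_face_str : String × Int := ("abcd", 90)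

def Spec_rotate_face_str (face : String) (deg : Int) (out : String) : Prop := out = rotate_face_str_alt face deg
instance (face : String) (deg : Int) (out : String) : Decidable (Spec_rotate_face_str face deg out) := by unfold Spec_rotate_face_str; infer_instance

-- ===== CLAIM (what is proved, stated in full; the proofs are below) =====
def Claim_equal_rotate_face_str : Prop := ∀ (face : String) (deg : Int), Dom_rotate_face_str face deg → Pre_rotate_face_str face deg → Spec_rotate_face_str face deg (rotate_face_str face deg)

-- ===== LEMMAS AND PROOFS =====
theorem rotate_step_eq (s : String) (a b c d : Char) (rest : List Char)
    (h : s.toList = a :: b :: c :: d :: rest) :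
    pvRotStep s = String.ofList [c, a, d, b] := by
  have e1 := PySem.List.pyGet?_ofNat (xs := a :: b :: c :: d :: rest) (n := 1) (by simp)
  have e2 := PySem.List.pyGet?_ofNat (xs := a :: b :: c :: d :: rest) (n := 2) (by simp)
  have e3 := PySem.List.pyGet?_ofNat (xs := a :: b :: c :: d :: rest) (n := 3) (by simp)
  simp only [pvRotStep, PySem.Str.pyGet?, h, List.map]
  norm_num at e1 e2 e3 ⊢
  simp [e1, e2, e3]

theorem rotate_A_table (s : String) (a b c d : Char) (rest : List Char)
    (h : s.toList = a :: b :: c :: d :: rest) (m : List Int) :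
    String.ofList (m.map (fun i => (PySem.Str.pyGet? s i).getD ' '))
      = String.ofList (m.map (fun i => (PySem.List.pyGet? (a :: b :: c :: d :: rest) i).getD ' ')) := by
  simp only [PySem.Str.pyGet?, h]
  rfl

theorem rotate_idx (a b c d : Char) (rest : List Char) :
    (PySem.List.pyGet? (a :: b :: c :: d :: rest) 0).getD ' ' = a ∧
    (PySem.List.pyGet? (a :: b :: c :: d :: rest) 1).getD ' ' = b ∧
    (PySem.List.pyGet? (a :: b :: c :: d :: rest) 2).getD ' ' = c ∧
    (PySem.List.pyGet? (a :: b :: c :: d :: rest) 3).getD ' ' = d := by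
  have e1 := PySem.List.pyGet?_ofNat (xs := a :: b :: c :: d :: rest) (n := 1) (by simp)
  have e2 := PySem.List.pyGet?_ofNat (xs := a :: b :: c :: d :: rest) (n := 2) (by simp)
  have e3 := PySem.List.pyGet?_ofNat (xs := a :: b :: c :: d :: rest) (n := 3) (by simp)
  norm_num at e1 e2 e3
  refine ⟨?_, ?_, ?_, ?_⟩ <;> simp [e1, e2, e3, PySem.List.pyGet?_zero_cons]

-- ===== VERDICT (by name: the statement is the Claim_ definition above) =====
theorem rotate_face_str_spec : Claim_equal_rotate_face_str := by
  intro face deg _ hpre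
  obtain ⟨hdeg, hlen⟩ := hpre
  unfold Spec_rotate_face_str
  rcases hdeg with h | h | h | h <;> subst h
  · simp [rotate_face_str, rotate_face_str_alt, PySem.Int.floordiv]
  all_goals
    have h4 : 4 ≤ face.toList.length := by
      rcases hlen with h | h
      · omega
      · exact h
  all_goals
    obtain ⟨a, b, c, d, rest, hl⟩ :
        ∃ a b c d rest, face.toList = a :: b :: c :: d :: rest := by
      rcases hl : face.toList with _ | ⟨a, _ | ⟨b, _ | ⟨c, _ | ⟨d, rest⟩⟩⟩⟩ <;>
        simp [hl] at h4 ⊢ <;> omega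
  all_goals
    obtain ⟨i0, i1, i2, i3⟩ := rotate_idx a b c d rest
  · -- deg = 90
    have hB : rotate_face_str_alt face 90 = pvRotStep face := by
      have hn : (PySem.Int.floordiv 90 90).toNat = 1 := by decide
      simp [rotate_face_str_alt, hn]
    rw [show rotate_face_str face 90 =
          String.ofList ([2,0,3,1].map (fun i => (PySem.Str.pyGet? face i).getD ' ')) from rfl,
        rotate_A_table face a b c d rest hl, hB, rotate_step_eq face a b c d rest hl]
    simp [i0, i1, i2, i3]
  · -- deg = 180
    have hB : rotate_face_str_alt face 180 = pvRotStep (pvRotStep face) := by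
      have hn : (PySem.Int.floordiv 180 90).toNat = 2 := by decide
      simp [rotate_face_str_alt, hn, Function.iterate_succ', -Function.iterate_succ]
    rw [show rotate_face_str face 180 =
          String.ofList ([3,2,1,0].map (fun i => (PySem.Str.pyGet? face i).getD ' ')) from rfl,
        rotate_A_table face a b c d rest hl, hB, rotate_step_eq face a b c d rest hl,
        rotate_step_eq (String.ofList [c,a,d,b]) c a d b [] (by simp)]
    simp [i0, i1, i2, i3]
  · -- deg = 270
    have hB : rotate_face_str_alt face 270 = pvRotStep (pvRotStep (pvRotStep face)) := by
      have hn : (PySem.Int.floordiv 270 90).toNat = 3 := by decide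
      simp [rotate_face_str_alt, hn, Function.iterate_succ', -Function.iterate_succ]
    rw [show rotate_face_str face 270 =
          String.ofList ([1,3,0,2].map (fun i => (PySem.Str.pyGet? face i).getD ' ')) from rfl,
        rotate_A_table face a b c d rest hl, hB, rotate_step_eq face a b c d rest hl,
        rotate_step_eq (String.ofList [c,a,d,b]) c a d b [] (by simp), rotate_step_eq (String.ofList [d,c,b,a]) d c b a [] (by simp)]
    simp [i0, i1, i2, i3]
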